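-- pv_equiv track=rewrite | github.com/hiyounger/test_02 | major_03_yangjun.py | need_03
-- ===== SOURCE A (Python) =====
-- def need_03(user_list, list_time):
--     for i in range(len(list_time)):
--         for j in range(len(user_list)):
--             if list_time[i][1] == user_list[j][0] and user_list[j][3] == 0:
--                 user_list[j][1] = list_time[i][0]
--                 user_list[j][3] = 1
--             if list_time[i][1] == user_list[j][0]:
--                 user_list[j][2] = list_time[i][0]
--     return user_list
-- ===== SOURCE B (Python) =====
-- def need_03(user_list, list_time):
--     # One pass over list_time builds key -> (first_time, last_time);
--     # one pass over user_list fills each row from that table.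
--     # Note: unlike the original, this builds new rows instead of mutating
--     # user_list's rows in place; the returned value is the same.
--     span = {}
--     for ev in list_time:
--         t, k = ev[0], ev[1]
--         if k in span:
--             span[k] = (span[k][0], t)
--         else:
--             span[k] = (t, t)
--     out = []
--     for u in user_list:
--         p = span.get(u[0])
--         if p is None:
--             out.append(u)
--         else:
--             first, last = p
--             v = list(u)
--             v[2] = last
--             if v[3] == 0:
--                 v[1] = first
--                 v[3] = 1
--             out.append(v)
--     return out
-- ===== Notes on version B (the rewrite author's own statement) =====
-- stated objective: faster
-- what changed: Replaces the nested scan of all (event,user) pairs by a single pass that precomputes a dict key->(first_time,last_time) from list_time followed by a single pass over user_list.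
-- outside the precondition, e.g. on need_03([[]], []): A returns [[]], B raises IndexError; on need_03([], [[1]]): A returns [], B raises IndexError
import Mathlib
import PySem

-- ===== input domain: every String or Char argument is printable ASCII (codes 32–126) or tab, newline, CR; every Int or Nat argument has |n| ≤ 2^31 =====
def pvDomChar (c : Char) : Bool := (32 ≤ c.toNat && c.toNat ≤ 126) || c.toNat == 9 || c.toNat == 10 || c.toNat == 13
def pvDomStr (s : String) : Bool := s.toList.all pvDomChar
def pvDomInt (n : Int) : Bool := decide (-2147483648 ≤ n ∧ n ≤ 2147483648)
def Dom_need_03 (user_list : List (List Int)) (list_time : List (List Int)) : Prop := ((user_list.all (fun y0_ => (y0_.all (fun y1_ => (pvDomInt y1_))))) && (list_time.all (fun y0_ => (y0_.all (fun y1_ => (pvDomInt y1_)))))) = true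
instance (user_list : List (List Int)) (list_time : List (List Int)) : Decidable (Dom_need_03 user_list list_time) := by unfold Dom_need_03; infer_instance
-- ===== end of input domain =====

-- B replaces A's nested scan over all (event, user) pairs by a table key -> (first, last)
-- built in one pass over list_time plus one pass over user_list.
-- A mutates user_list's rows in place while B builds fresh rows; the claim is about the return value.

-- ===== PORT A =====
-- literal transliteration: outer loop over indices of list_time, inner over indices of user_list;
-- the in-place element assignments user_list[j][...] = ... are modelled by pySetD on the accumulator
def need_03 (user_list : List (List Int)) (list_time : List (List Int)) : List (List Int) :=
  (PySem.List.pyRange 0 (list_time.length : Int) 1).foldl (fun ul i =>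
    (PySem.List.pyRange 0 (ul.length : Int) 1).foldl (fun acc j =>
      let e := PySem.List.pyGetD list_time i []
      let u := PySem.List.pyGetD acc j []
      let u1 := if PySem.List.pyGetD e 1 0 = PySem.List.pyGetD u 0 0 ∧ PySem.List.pyGetD u 3 0 = 0
                then PySem.List.pySetD (PySem.List.pySetD u 1 (PySem.List.pyGetD e 0 0)) 3 1 else u
      let u2 := if PySem.List.pyGetD e 1 0 = PySem.List.pyGetD u1 0 0
                then PySem.List.pySetD u1 2 (PySem.List.pyGetD e 0 0) else u1
      PySem.List.pySetD acc j u2) ul) user_list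

-- ===== PORT B =====
-- key -> (first_time, last_time) from list_time (Source B's first loop)
def spanDict (list_time : List (List Int)) : PySem.Dict Int (Int × Int) :=
  list_time.foldl (fun d ev =>
    let t := PySem.List.pyGetD ev 0 0
    let k := PySem.List.pyGetD ev 1 0
    match d.get? k with
    | some p => d.insert k (p.1, t)
    | none   => d.insert k (t, t)) PySem.Dict.empty

-- fill one user row from the table (Source B's second loop body)
def fillRow (d : PySem.Dict Int (Int × Int)) (u : List Int) : List Int :=
  match d.get? (PySem.List.pyGetD u 0 0) with
  | none => u
  | some (f, l) =>
    let v := PySem.List.pySetD u 2 l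
    if PySem.List.pyGetD v 3 0 = 0 then PySem.List.pySetD (PySem.List.pySetD v 1 f) 3 1 else v

def need_03_alt (user_list : List (List Int)) (list_time : List (List Int)) : List (List Int) :=
  user_list.map (fillRow (spanDict list_time))

-- ===== PRECONDITION & SPEC =====
-- Pre_ is the row shape A's indexing needs: every time row has length ≥ 2, every user row
-- length ≥ 1, and length ≥ 4 whenever its key occurs in list_time; it thereby also excludes the
-- degenerate inputs where one list is empty so A returns without ever indexing the ill-shaped
-- other list (B still indexes every row there and raises).
def Pre_need_03 (user_list : List (List Int)) (list_time : List (List Int)) : Prop :=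
  (∀ e ∈ list_time, 2 ≤ e.length) ∧
  ∀ u ∈ user_list, 1 ≤ u.length ∧
    ((∃ e ∈ list_time, e.getD 1 0 = u.getD 0 0) → 4 ≤ u.length)

instance (user_list : List (List Int)) (list_time : List (List Int)) : Decidable (Pre_need_03 user_list list_time) := by unfold Pre_need_03; infer_instance

def pvWitness_need_03 : List (List Int) × List (List Int) :=
  ([[1, 0, 0, 0], [2, 5, 5, 1], [9]], [[10, 1], [20, 1], [30, 2]])

def Spec_need_03 (user_list : List (List Int)) (list_time : List (List Int)) (out : List (List Int)) : Prop := out = need_03_alt user_list list_time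
instance (user_list : List (List Int)) (list_time : List (List Int)) (out : List (List Int)) : Decidable (Spec_need_03 user_list list_time out) := by unfold Spec_need_03; infer_instance

-- ===== CLAIM (what is proved, stated in full; the proofs are below) =====
def Claim_equal_need_03 : Prop := ∀ (user_list : List (List Int)) (list_time : List (List Int)), Dom_need_03 user_list list_time → Pre_need_03 user_list list_time → Spec_need_03 user_list list_time (need_03 user_list list_time)

-- ===== LEMMAS AND PROOFS =====

-- the generic "index loop that rewrites each slot in place" is a map
theorem loop_map_aux (g : List Int → List Int) :
    ∀ (suf pre : List (List Int)),
      (PySem.List.pyRange (pre.length : Int) ((pre.length : Int) + (suf.length : Int)) 1).foldl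
        (fun acc j => PySem.List.pySetD acc j (g (PySem.List.pyGetD acc j []))) (pre ++ suf)
      = pre ++ suf.map g := by
  intro suf
  induction suf with
  | nil => intro pre; simp [PySem.List.pyRange_one_eq_nil]
  | cons s suf ih =>
    intro pre
    rw [PySem.List.pyRange_one_cons (by simp only [List.length_cons]; push_cast; omega)]
    simp only [List.foldl_cons, PySem.List.pyGetD_natCast, PySem.List.pySetD_natCast]
    have h1 : (pre ++ s :: suf).getD pre.length [] = s := by
      simp [List.getD]
    have h2 : (pre ++ s :: suf).set pre.length (g s) = (pre ++ [g s]) ++ suf := by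
      simp
    rw [h1, h2]
    have := ih (pre ++ [g s])
    have harith : ((pre ++ [g s]).length : Int) = (pre.length : Int) + 1 := by
      simp
    rw [harith] at this
    have harith2 : (pre.length : Int) + 1 + (suf.length : Int)
        = (pre.length : Int) + ((suf.length : Int) + 1) := by ring
    rw [harith2] at this
    simpa using this

def stepRow (e u : List Int) : List Int :=
  let u1 := if PySem.List.pyGetD e 1 0 = PySem.List.pyGetD u 0 0 ∧ PySem.List.pyGetD u 3 0 = 0
            then PySem.List.pySetD (PySem.List.pySetD u 1 (PySem.List.pyGetD e 0 0)) 3 1 else u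
  if PySem.List.pyGetD e 1 0 = PySem.List.pyGetD u1 0 0
  then PySem.List.pySetD u1 2 (PySem.List.pyGetD e 0 0) else u1

def dstep (d : PySem.Dict Int (Int × Int)) (ev : List Int) : PySem.Dict Int (Int × Int) :=
  let t := PySem.List.pyGetD ev 0 0
  let k := PySem.List.pyGetD ev 1 0
  match d.get? k with
  | some p => d.insert k (p.1, t)
  | none   => d.insert k (t, t)

theorem spanDict_append_singleton (lt : List (List Int)) (e : List Int) :
    spanDict (lt ++ [e]) = dstep (spanDict lt) e := by
  simp [spanDict, dstep, List.foldl_append]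

theorem get?_dstep (d : PySem.Dict Int (Int × Int)) (ev : List Int) (k : Int) :
    (dstep d ev).get? k
      = if k = PySem.List.pyGetD ev 1 0
        then some (match d.get? (PySem.List.pyGetD ev 1 0) with
                   | some p => (p.1, PySem.List.pyGetD ev 0 0)
                   | none => (PySem.List.pyGetD ev 0 0, PySem.List.pyGetD ev 0 0))
        else d.get? k := by
  unfold dstep
  cases h : d.get? (PySem.List.pyGetD ev 1 0) <;>
    simp [h, PySem.Dict.get?_insert]

theorem get?_spanDict_none (lt : List (List Int)) (k : Int) :
    (spanDict lt).get? k = none ↔ ∀ e ∈ lt, PySem.List.pyGetD e 1 0 ≠ k := by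
  induction lt using List.reverseRecOn with
  | nil => simp [spanDict, PySem.Dict.get?_empty]
  | append_singleton lt e ih =>
    rw [spanDict_append_singleton, get?_dstep]
    by_cases hk : k = PySem.List.pyGetD e 1 0 <;> simp [hk, ih]
    · exact ⟨e, Or.inr rfl, rfl⟩
    · constructor
      · rintro h e' (he' | rfl)
        · exact h e' he'
        · exact fun hc => hk hc.symm
      · intro h e' he'; exact h e' (Or.inl he')

theorem stepRow_of_ne (e u : List Int)
    (h : PySem.List.pyGetD e 1 0 ≠ PySem.List.pyGetD u 0 0) :
    stepRow e u = u := by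
  simp [stepRow, h]

theorem fillRow_of_none (d : PySem.Dict Int (Int × Int)) (u : List Int)
    (h : d.get? (PySem.List.pyGetD u 0 0) = none) : fillRow d u = u := by
  simp [fillRow, h]

theorem getD_eq_pyGetD_one (e : List Int) (h : 2 ≤ e.length) :
    e.getD 1 0 = PySem.List.pyGetD e 1 0 := by
  match e, h with
  | t :: k :: er, _ => simp [pysem]

theorem getD_eq_pyGetD_zero (u : List Int) (h : 1 ≤ u.length) :
    u.getD 0 0 = PySem.List.pyGetD u 0 0 := by
  match u, h with
  | a :: r, _ => simp [pysem]


theorem g0 (a : Int) (r : List Int) : PySem.List.pyGetD (a::r) 0 0 = a := by simp [pysem]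
theorem g1 (a b : Int) (r : List Int) : PySem.List.pyGetD (a::b::r) 1 0 = b := by simp [pysem]
theorem g3 (a b c d : Int) (r : List Int) : PySem.List.pyGetD (a::b::c::d::r) 3 0 = d := by
  simp [pysem]
theorem s1 (a b v : Int) (r : List Int) : PySem.List.pySetD (a::b::r) 1 v = a::v::r := by
  simp [pysem]
theorem s2' (a b c v : Int) (r : List Int) : PySem.List.pySetD (a::b::c::r) 2 v = a::b::v::r := by
  simp [pysem]
theorem s3' (a b c d v : Int) (r : List Int) : PySem.List.pySetD (a::b::c::d::r) 3 v = a::b::c::v::r := by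
  simp [pysem]

theorem fillRow_cons (d : PySem.Dict Int (Int × Int)) (a b c dd : Int) (r : List Int) :
    fillRow d (a::b::c::dd::r)
      = match d.get? a with
        | none => a::b::c::dd::r
        | some (f, l) => if dd = 0 then a::f::l::1::r else a::b::l::dd::r := by
  cases h : d.get? a with
  | none => simp only [fillRow, g0, h]
  | some p =>
    obtain ⟨f, l⟩ := p
    by_cases hdd : dd = 0 <;> simp [fillRow, g0, h, s2', g3, s1, s3', hdd]

theorem stepRow_cons (t k a b c dd : Int) (er r : List Int) :
    stepRow (t::k::er) (a::b::c::dd::r)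
      = if k = a then
          (if dd = 0 then a::t::t::1::r else a::b::t::dd::r)
        else a::b::c::dd::r := by
  by_cases hk : k = a
  · by_cases hdd : dd = 0 <;> simp [stepRow, g0, g1, g3, s1, s2', s3', hk, hdd]
  · simp [stepRow, g0, g1, hk]

theorem row_eq (lt : List (List Int)) (u : List Int)
    (hlt : ∀ e ∈ lt, 2 ≤ e.length)
    (hu1 : 1 ≤ u.length)
    (hu4 : (∃ e ∈ lt, e.getD 1 0 = u.getD 0 0) → 4 ≤ u.length) :
    lt.foldl (fun v e => stepRow e v) u = fillRow (spanDict lt) u := by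
  induction lt using List.reverseRecOn with
  | nil => simp [spanDict, fillRow, PySem.Dict.get?_empty]
  | append_singleton lt e ih =>
    have hlt' : ∀ e' ∈ lt, 2 ≤ e'.length := fun e' he' => hlt e' (by simp [he'])
    have he2 : 2 ≤ e.length := hlt e (by simp)
    have hu4' : (∃ e' ∈ lt, e'.getD 1 0 = u.getD 0 0) → 4 ≤ u.length := by
      rintro ⟨e', he', hk⟩; exact hu4 ⟨e', by simp [he'], hk⟩
    rw [List.foldl_append, List.foldl_cons, List.foldl_nil,
        ih hlt' hu4', spanDict_append_singleton]
    by_cases hke : PySem.List.pyGetD e 1 0 = PySem.List.pyGetD u 0 0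
    · have h4 : 4 ≤ u.length := hu4 ⟨e, by simp,
        by rw [getD_eq_pyGetD_one e he2, getD_eq_pyGetD_zero u hu1, hke]⟩
      match u, h4 with
      | a :: b :: c :: dd :: r, _ =>
        match e, he2 with
        | t :: k :: er, _ =>
          have hk : k = a := by simpa [g1, g0] using hke
          subst hk
          rw [fillRow_cons, fillRow_cons, get?_dstep, g1, g0, if_pos rfl]
          cases hd : (spanDict lt).get? k with
          | none =>
            simp only [hd, stepRow_cons, if_pos rfl]
            simp
          | some p =>
            obtain ⟨f, l⟩ := p
            simp only [hd]
            by_cases hdd : dd = 0 <;>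
              simp only [hdd, if_true, if_false, stepRow_cons, if_pos rfl, if_neg] <;>
              simp [stepRow_cons]
    · conv_rhs => rw [fillRow, get?_dstep]
      have hne : PySem.List.pyGetD u 0 0 ≠ PySem.List.pyGetD e 1 0 := fun hc => hke hc.symm
      rw [if_neg hne]
      cases hd : (spanDict lt).get? (PySem.List.pyGetD u 0 0) with
      | none =>
        rw [fillRow_of_none _ _ hd]
        exact stepRow_of_ne e u hke
      | some p =>
        obtain ⟨f, l⟩ := p
        have h4 : 4 ≤ u.length := by
          apply hu4'
          have := (not_iff_not.mpr (get?_spanDict_none lt (PySem.List.pyGetD u 0 0))).mp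
            (by simp [hd])
          push_neg at this
          obtain ⟨e', he', hk'⟩ := this
          exact ⟨e', he', by rw [getD_eq_pyGetD_one e' (hlt' e' he'),
            getD_eq_pyGetD_zero u hu1, hk']⟩
        match u, h4 with
        | a :: b :: c :: dd :: r, _ =>
          match e, he2 with
          | t :: k :: er, _ =>
            have hka : k ≠ a := by simpa [g1, g0] using hke
            have hd' : (spanDict lt).get? a = some (f, l) := by simpa [g0] using hd
            rw [show fillRow (spanDict lt) (a::b::c::dd::r)
                  = if dd = 0 then a::f::l::1::r else a::b::l::dd::r by
                rw [fillRow_cons, hd']]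
            by_cases hdd : dd = 0 <;> simp [hdd, stepRow_cons, hka, g0, g3, s1, s2', s3']

-- A's inner loop over user indices, for one event, is a map of stepRow over the rows
theorem inner_eq (e : List Int) (ul : List (List Int)) :
    (PySem.List.pyRange 0 (ul.length : Int) 1).foldl
      (fun acc j => PySem.List.pySetD acc j (stepRow e (PySem.List.pyGetD acc j []))) ul
      = ul.map (stepRow e) := by
  simpa using loop_map_aux (stepRow e) ul []

-- A is a fold of per-event full-list updates
theorem A_eq (ul lt : List (List Int)) :
    need_03 ul lt = lt.foldl (fun acc e => acc.map (stepRow e)) ul := by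
  have h1 : need_03 ul lt
      = (PySem.List.pyRange 0 (lt.length : Int) 1).foldl
          (fun acc i =>
            (PySem.List.pyRange 0 (acc.length : Int) 1).foldl
              (fun a j => PySem.List.pySetD a j
                (stepRow (PySem.List.pyGetD lt i []) (PySem.List.pyGetD a j []))) acc) ul := rfl
  rw [h1]
  simp only [inner_eq]
  exact PySem.List.foldl_pyRange_zero_pyGetD' lt [] (fun acc e => acc.map (stepRow e)) ul

-- folding per-event whole-list maps = mapping the per-row fold
theorem foldl_map_comm :
    ∀ (lt ul : List (List Int)),
      lt.foldl (fun acc e => acc.map (stepRow e)) ul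
        = ul.map (fun u => lt.foldl (fun v e => stepRow e v) u) := by
  intro lt
  induction lt with
  | nil => intro ul; simp
  | cons e lt ih =>
    intro ul
    simp only [List.foldl_cons]
    rw [ih]
    simp [List.map_map, Function.comp_def]

-- ===== VERDICT (by name: the statement is the Claim_ definition above) =====
theorem need_03_spec : Claim_equal_need_03 := by
  intro ul lt _ hpre
  obtain ⟨hlt, hu⟩ := hpre
  show need_03 ul lt = need_03_alt ul lt
  rw [A_eq, foldl_map_comm]
  unfold need_03_alt
  apply List.map_congr_left
  intro u hu'
  exact row_eq lt u hlt (hu u hu').1 (hu u hu').2
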